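-- pv_equiv track=rewrite | github.com/Alexsovich5/DAPP | python-backend/app/api/v1/routers/discovery.py | _categorize_interests
-- ===== SOURCE A (Python) =====
-- from typing import Dict, List, Optional, Any
--
-- def _categorize_interests(interests: List[str]) -> Dict[str, List[str]]:
--     """Categorize interests into broad categories."""
--     categories = {
--         "Sports & Fitness": [],
--         "Arts & Culture": [],
--         "Technology": [],
--         "Food & Cooking": [],
--         "Travel": [],
--         "Music": [],
--         "Other": []
--     }
--
--     # Simple keyword-based categorization
--     for interest in interests:
--         interest_lower = interest.lower()
--         categorized = False
--
--         if any(word in interest_lower for word in ['sport', 'gym', 'fitness', 'running', 'yoga', 'hiking']):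
--             categories["Sports & Fitness"].append(interest)
--             categorized = True
--         elif any(word in interest_lower for word in ['art', 'music', 'painting', 'culture', 'museum', 'theater']):
--             categories["Arts & Culture"].append(interest)
--             categorized = True
--         elif any(word in interest_lower for word in ['tech', 'programming', 'computer', 'coding', 'AI']):
--             categories["Technology"].append(interest)
--             categorized = True
--         elif any(word in interest_lower for word in ['food', 'cooking', 'restaurant', 'cuisine', 'chef']):
--             categories["Food & Cooking"].append(interest)
--             categorized = True
--         elif any(word in interest_lower for word in ['travel', 'trip', 'vacation', 'country', 'explore']):
--             categories["Travel"].append(interest)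
--             categorized = True
--
--         if not categorized:
--             categories["Other"].append(interest)
--
--     # Remove empty categories
--     return {k: v for k, v in categories.items() if v}
-- ===== SOURCE B (Python) =====
-- # Table-driven rewrite: one rule table + per-category filter passes instead of a
-- # per-interest if/elif cascade mutating pre-made buckets.
--
-- RULES = (
--     ("Sports & Fitness", ("sport", "gym", "fitness", "running", "yoga", "hiking")),
--     ("Arts & Culture", ("art", "music", "painting", "culture", "museum", "theater")),
--     ("Technology", ("tech", "programming", "computer", "coding", "AI")),
--     ("Food & Cooking", ("food", "cooking", "restaurant", "cuisine", "chef")),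
--     ("Travel", ("travel", "trip", "vacation", "country", "explore")),
-- )
--
-- CATEGORY_ORDER = ("Sports & Fitness", "Arts & Culture", "Technology",
--                   "Food & Cooking", "Travel", "Music", "Other")
--
--
-- def _label(interest):
--     low = interest.lower()
--     for name, kws in RULES:
--         if any(k in low for k in kws):
--             return name
--     return "Other"
--
--
-- def _categorize_interests(interests):
--     buckets = [(c, [i for i in interests if _label(i) == c]) for c in CATEGORY_ORDER]
--     return {c: members for c, members in buckets if members}
-- ===== Notes on version B (the rewrite author's own statement) =====
-- stated objective: simpler
-- what changed: Replaces the per-interest if/elif cascade that mutates seven pre-created dict buckets (plus a categorized flag and a final empty-bucket strip) by a declarative rule table: one first-match labelling helper and one filter pass per category, keeping only non-empty buckets.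
import Mathlib
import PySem

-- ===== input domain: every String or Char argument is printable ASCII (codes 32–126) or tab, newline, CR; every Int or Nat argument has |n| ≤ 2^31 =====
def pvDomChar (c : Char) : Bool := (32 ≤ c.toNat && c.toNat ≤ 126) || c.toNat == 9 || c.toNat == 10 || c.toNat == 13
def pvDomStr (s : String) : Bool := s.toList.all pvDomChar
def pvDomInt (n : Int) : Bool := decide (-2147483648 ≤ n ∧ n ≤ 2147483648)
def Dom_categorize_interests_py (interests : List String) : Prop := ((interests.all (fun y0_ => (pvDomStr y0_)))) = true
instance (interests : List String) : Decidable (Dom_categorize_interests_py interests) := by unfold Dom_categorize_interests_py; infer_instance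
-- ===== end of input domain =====

-- B replaces A's per-interest if/elif cascade over pre-made mutable buckets by a rule
-- table and one filter pass per category (objective: simpler); same return value everywhere.

-- ===== PORT A =====
def kwSports : List String := ["sport", "gym", "fitness", "running", "yoga", "hiking"]
def kwArts : List String := ["art", "music", "painting", "culture", "museum", "theater"]
def kwTech : List String := ["tech", "programming", "computer", "coding", "AI"]
def kwFood : List String := ["food", "cooking", "restaurant", "cuisine", "chef"]
def kwTravel : List String := ["travel", "trip", "vacation", "country", "explore"]

-- `any(word in interest_lower for word in ws)`
def pyAnyIn (ws : List String) (s : String) : Bool := ws.any (fun w => PySem.Str.isIn w s)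

-- loop body of A: the if/elif chain appending to the matching bucket ("Other" if none)
def catStepA (d : PySem.Dict String (List String)) (interest : String) :
    PySem.Dict String (List String) :=
  let low := PySem.Str.lower interest
  if pyAnyIn kwSports low then d.modify "Sports & Fitness" [] (· ++ [interest])
  else if pyAnyIn kwArts low then d.modify "Arts & Culture" [] (· ++ [interest])
  else if pyAnyIn kwTech low then d.modify "Technology" [] (· ++ [interest])
  else if pyAnyIn kwFood low then d.modify "Food & Cooking" [] (· ++ [interest])
  else if pyAnyIn kwTravel low then d.modify "Travel" [] (· ++ [interest])
  else d.modify "Other" [] (· ++ [interest])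

def categorize_interests_py (interests : List String) : List (String × List String) :=
  let categories : PySem.Dict String (List String) := PySem.Dict.mk
    [("Sports & Fitness", []), ("Arts & Culture", []), ("Technology", []),
     ("Food & Cooking", []), ("Travel", []), ("Music", []), ("Other", [])]
  let d := interests.foldl catStepA categories
  d.items.filter (fun p => !p.2.isEmpty)

-- ===== PORT B =====
def RULES : List (String × List String) :=
  [("Sports & Fitness", ["sport", "gym", "fitness", "running", "yoga", "hiking"]),
   ("Arts & Culture", ["art", "music", "painting", "culture", "museum", "theater"]),
   ("Technology", ["tech", "programming", "computer", "coding", "AI"]),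
   ("Food & Cooking", ["food", "cooking", "restaurant", "cuisine", "chef"]),
   ("Travel", ["travel", "trip", "vacation", "country", "explore"])]

def CATEGORY_ORDER : List String :=
  ["Sports & Fitness", "Arts & Culture", "Technology", "Food & Cooking", "Travel",
   "Music", "Other"]

-- scan the rule table: first rule whose keyword test passes names the category, else "Other"
def firstMatch (low : String) : List (String × List String) → String
  | [] => "Other"
  | (name, kws) :: rest =>
    if kws.any (fun k => PySem.Str.isIn k low) then name else firstMatch low rest

def labelOf (interest : String) : String := firstMatch (PySem.Str.lower interest) RULES

def categorize_interests_py_alt (interests : List String) : List (String × List String) :=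
  let buckets := CATEGORY_ORDER.map (fun c => (c, interests.filter (fun i => labelOf i == c)))
  buckets.filter (fun p => !p.2.isEmpty)

-- ===== PRECONDITION & SPEC =====
def Spec_categorize_interests_py (interests : List String) (out : List (String × List String)) : Prop := out = categorize_interests_py_alt interests
instance (interests : List String) (out : List (String × List String)) : Decidable (Spec_categorize_interests_py interests out) := by unfold Spec_categorize_interests_py; infer_instance

-- ===== CLAIM (what is proved, stated in full; the proofs are below) =====
def Claim_equal_categorize_interests_py : Prop := ∀ (interests : List String), Dom_categorize_interests_py interests → Spec_categorize_interests_py interests (categorize_interests_py interests)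

-- ===== LEMMAS AND PROOFS =====

-- labelOf, with the literal rule table unfolded, is A's decision chain
lemma labelOf_ite (i : String) : labelOf i =
    (if pyAnyIn kwSports (PySem.Str.lower i) then "Sports & Fitness"
     else if pyAnyIn kwArts (PySem.Str.lower i) then "Arts & Culture"
     else if pyAnyIn kwTech (PySem.Str.lower i) then "Technology"
     else if pyAnyIn kwFood (PySem.Str.lower i) then "Food & Cooking"
     else if pyAnyIn kwTravel (PySem.Str.lower i) then "Travel"
     else "Other") := rfl

-- A's loop, started from the seven buckets v1..v7, ends with each bucket extended by
-- exactly the interests B labels with that bucket's name.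
lemma loopA (l : List String) : ∀ (v1 v2 v3 v4 v5 v6 v7 : List String),
    (l.foldl catStepA (PySem.Dict.mk
          [("Sports & Fitness", v1), ("Arts & Culture", v2), ("Technology", v3), ("Food & Cooking", v4), ("Travel", v5), ("Music", v6), ("Other", v7)])).items
    = [("Sports & Fitness", v1 ++ l.filter (fun i => labelOf i == "Sports & Fitness")), ("Arts & Culture", v2 ++ l.filter (fun i => labelOf i == "Arts & Culture")), ("Technology", v3 ++ l.filter (fun i => labelOf i == "Technology")), ("Food & Cooking", v4 ++ l.filter (fun i => labelOf i == "Food & Cooking")), ("Travel", v5 ++ l.filter (fun i => labelOf i == "Travel")), ("Music", v6 ++ l.filter (fun i => labelOf i == "Music")), ("Other", v7 ++ l.filter (fun i => labelOf i == "Other"))] := by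
  induction l with
  | nil => intro v1 v2 v3 v4 v5 v6 v7; simp
  | cons i t ih =>
    intro v1 v2 v3 v4 v5 v6 v7
    simp only [List.foldl_cons, catStepA]
    split_ifs with h1 h2 h3 h4 h5
    · have hl : labelOf i = "Sports & Fitness" := by
        rw [labelOf_ite, if_pos h1]
      have hmk : (PySem.Dict.mk
          [("Sports & Fitness", v1), ("Arts & Culture", v2), ("Technology", v3), ("Food & Cooking", v4), ("Travel", v5), ("Music", v6), ("Other", v7)]).modify "Sports & Fitness" [] (fun x => x ++ [i]) = PySem.Dict.mk
          [("Sports & Fitness", v1 ++ [i]), ("Arts & Culture", v2), ("Technology", v3), ("Food & Cooking", v4), ("Travel", v5), ("Music", v6), ("Other", v7)] := by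
        simp [PySem.Dict.modify, PySem.Dict.insert, PySem.Dict.getD, PySem.Dict.get?,
              PySem.Dict.contains, List.find?]
      rw [hmk, ih]
      simp [hl]
    · have hl : labelOf i = "Arts & Culture" := by
        rw [labelOf_ite, if_neg h1, if_pos h2]
      have hmk : (PySem.Dict.mk
          [("Sports & Fitness", v1), ("Arts & Culture", v2), ("Technology", v3), ("Food & Cooking", v4), ("Travel", v5), ("Music", v6), ("Other", v7)]).modify "Arts & Culture" [] (fun x => x ++ [i]) = PySem.Dict.mk
          [("Sports & Fitness", v1), ("Arts & Culture", v2 ++ [i]), ("Technology", v3), ("Food & Cooking", v4), ("Travel", v5), ("Music", v6), ("Other", v7)] := by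
        simp [PySem.Dict.modify, PySem.Dict.insert, PySem.Dict.getD, PySem.Dict.get?,
              PySem.Dict.contains, List.find?]
      rw [hmk, ih]
      simp [hl]
    · have hl : labelOf i = "Technology" := by
        rw [labelOf_ite, if_neg h1, if_neg h2, if_pos h3]
      have hmk : (PySem.Dict.mk
          [("Sports & Fitness", v1), ("Arts & Culture", v2), ("Technology", v3), ("Food & Cooking", v4), ("Travel", v5), ("Music", v6), ("Other", v7)]).modify "Technology" [] (fun x => x ++ [i]) = PySem.Dict.mk
          [("Sports & Fitness", v1), ("Arts & Culture", v2), ("Technology", v3 ++ [i]), ("Food & Cooking", v4), ("Travel", v5), ("Music", v6), ("Other", v7)] := by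
        simp [PySem.Dict.modify, PySem.Dict.insert, PySem.Dict.getD, PySem.Dict.get?,
              PySem.Dict.contains, List.find?]
      rw [hmk, ih]
      simp [hl]
    · have hl : labelOf i = "Food & Cooking" := by
        rw [labelOf_ite, if_neg h1, if_neg h2, if_neg h3, if_pos h4]
      have hmk : (PySem.Dict.mk
          [("Sports & Fitness", v1), ("Arts & Culture", v2), ("Technology", v3), ("Food & Cooking", v4), ("Travel", v5), ("Music", v6), ("Other", v7)]).modify "Food & Cooking" [] (fun x => x ++ [i]) = PySem.Dict.mk
          [("Sports & Fitness", v1), ("Arts & Culture", v2), ("Technology", v3), ("Food & Cooking", v4 ++ [i]), ("Travel", v5), ("Music", v6), ("Other", v7)] := by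
        simp [PySem.Dict.modify, PySem.Dict.insert, PySem.Dict.getD, PySem.Dict.get?,
              PySem.Dict.contains, List.find?]
      rw [hmk, ih]
      simp [hl]
    · have hl : labelOf i = "Travel" := by
        rw [labelOf_ite, if_neg h1, if_neg h2, if_neg h3, if_neg h4, if_pos h5]
      have hmk : (PySem.Dict.mk
          [("Sports & Fitness", v1), ("Arts & Culture", v2), ("Technology", v3), ("Food & Cooking", v4), ("Travel", v5), ("Music", v6), ("Other", v7)]).modify "Travel" [] (fun x => x ++ [i]) = PySem.Dict.mk
          [("Sports & Fitness", v1), ("Arts & Culture", v2), ("Technology", v3), ("Food & Cooking", v4), ("Travel", v5 ++ [i]), ("Music", v6), ("Other", v7)] := by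
        simp [PySem.Dict.modify, PySem.Dict.insert, PySem.Dict.getD, PySem.Dict.get?,
              PySem.Dict.contains, List.find?]
      rw [hmk, ih]
      simp [hl]
    · have hl : labelOf i = "Other" := by
        rw [labelOf_ite, if_neg h1, if_neg h2, if_neg h3, if_neg h4, if_neg h5]
      have hmk : (PySem.Dict.mk
          [("Sports & Fitness", v1), ("Arts & Culture", v2), ("Technology", v3), ("Food & Cooking", v4), ("Travel", v5), ("Music", v6), ("Other", v7)]).modify "Other" [] (fun x => x ++ [i]) = PySem.Dict.mk
          [("Sports & Fitness", v1), ("Arts & Culture", v2), ("Technology", v3), ("Food & Cooking", v4), ("Travel", v5), ("Music", v6), ("Other", v7 ++ [i])] := by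
        simp [PySem.Dict.modify, PySem.Dict.insert, PySem.Dict.getD, PySem.Dict.get?,
              PySem.Dict.contains, List.find?]
      rw [hmk, ih]
      simp [hl]

theorem categorize_interests_py_spec : Claim_equal_categorize_interests_py := by
  intro interests _
  unfold Spec_categorize_interests_py
  simp only [categorize_interests_py, categorize_interests_py_alt]
  rw [loopA]
  simp [CATEGORY_ORDER]
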